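-- pv_equiv track=rewrite | github.com/NikhilManu/Topicwise-Questions | Bitwise operators/04-Magic Number.py | getMagicNumber
-- ===== SOURCE A (Python) =====
-- def getMagicNumber(n, base):
--     ans = 0
--     curBase = base
--     while n > 0:
--         lastDigit = n & 1
--         n = n >> 1
--
--         ans += lastDigit * base
--         curBase *= base
--
--     return ans
-- ===== SOURCE B (Python) =====
-- # Byte-wise popcount with a precomputed 256-entry table:
-- # table[i] = number of set bits of i; answer = base * sum of table lookups per byte.
-- _POPCOUNT = [0] * 256
-- for _i in range(1, 256):
--     _POPCOUNT[_i] = _POPCOUNT[_i >> 1] + (_i & 1)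
--
--
-- def getMagicNumber(n, base):
--     ans = 0
--     while n > 0:
--         ans += _POPCOUNT[n & 0xFF] * base
--         n >>= 8
--     return ans
-- ===== Notes on version B (the rewrite author's own statement) =====
-- stated objective: alternative
-- what changed: Replaced the per-bit shift-and-add loop (with its dead curBase) by a table-driven byte-wise popcount: a 256-entry lookup table built once at module level, then one loop step per byte of n adding table[n & 0xFF] * base.
import Mathlib
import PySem

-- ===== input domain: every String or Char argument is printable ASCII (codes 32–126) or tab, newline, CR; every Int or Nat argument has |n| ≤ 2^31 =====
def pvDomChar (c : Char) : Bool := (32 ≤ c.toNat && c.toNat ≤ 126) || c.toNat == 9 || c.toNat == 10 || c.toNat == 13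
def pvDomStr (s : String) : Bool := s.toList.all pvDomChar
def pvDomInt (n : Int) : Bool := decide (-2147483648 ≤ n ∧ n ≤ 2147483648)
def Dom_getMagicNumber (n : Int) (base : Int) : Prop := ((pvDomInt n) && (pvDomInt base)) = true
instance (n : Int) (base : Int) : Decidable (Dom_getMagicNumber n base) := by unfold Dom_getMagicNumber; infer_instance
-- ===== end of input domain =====

-- B replaces A's per-bit shift-and-add loop (and its dead curBase) by a byte-wise
-- popcount using a precomputed 256-entry lookup table; objective: alternative.


-- ===== PORT A =====
-- A's while loop: it only runs while n > 0, so the loop state n is a nonnegative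
-- integer and is carried as a Nat (m % 2 = n & 1, m / 2 = n >> 1 for n ≥ 0, exact).
-- curBase is kept even though A never reads it.
def getMagicNumberLoop (m : Nat) (ans : Int) (base : Int) (curBase : Int) : Int :=
  if m > 0 then
    getMagicNumberLoop (m / 2) (ans + (m % 2 : Int) * base) base (curBase * base)
  else ans
decreasing_by exact Nat.div_lt_self (by omega) (by omega)

def getMagicNumber (n : Int) (base : Int) : Int :=
  if n > 0 then getMagicNumberLoop n.toNat 0 base base else 0

-- ===== PORT B =====
-- Port of Source B's module-level table build: _POPCOUNT = [0]*256; for i in range(1,256):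
-- _POPCOUNT[i] = _POPCOUNT[i >> 1] + (i & 1).  The entries are nonnegative bit counts,
-- carried as Nat.
def popTable : List Nat :=
  (PySem.List.pyRange 1 256 1).foldl
    (fun t i => t.set i.toNat (t.getD (i.toNat >>> 1) 0 + (i.toNat &&& 1)))
    (List.replicate 256 0)

-- Source B's while loop: runs only while n > 0, state carried as a Nat (exact for n ≥ 0);
-- n & 0xFF is a valid index into the 256-entry table, looked up with getD.
def byteLoop (m : Nat) (ans : Int) (base : Int) : Int :=
  if m > 0 then
    byteLoop (m >>> 8) (ans + (popTable.getD (m &&& 255) 0 : Int) * base) base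
  else ans
decreasing_by
  simp [Nat.shiftRight_eq_div_pow]
  exact Nat.div_lt_self (by omega) (by omega)

def getMagicNumber_alt (n : Int) (base : Int) : Int :=
  if n > 0 then byteLoop n.toNat 0 base else 0

-- ===== PRECONDITION & SPEC =====
def Spec_getMagicNumber (n : Int) (base : Int) (out : Int) : Prop := out = getMagicNumber_alt n base
instance (n : Int) (base : Int) (out : Int) : Decidable (Spec_getMagicNumber n base out) := by unfold Spec_getMagicNumber; infer_instance

-- ===== CLAIM (what is proved, stated in full; the proofs are below) =====
def Claim_equal_getMagicNumber : Prop := ∀ (n : Int) (base : Int), Dom_getMagicNumber n base → Spec_getMagicNumber n base (getMagicNumber n base)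

-- ===== LEMMAS AND PROOFS =====

-- popcountB m = the number of 1 bits of m (A's loop accumulates base per 1 bit).
def popcountB (m : Nat) : Nat :=
  if m = 0 then 0 else m % 2 + popcountB (m / 2)
decreasing_by exact Nat.div_lt_self (by omega) (by omega)

theorem popcountB_eq (m : Nat) : popcountB m = m % 2 + popcountB (m / 2) := by
  rw [popcountB]
  by_cases h : m = 0
  · subst h; rw [popcountB]; simp
  · rw [if_neg h]

theorem popcountB_bit (r x : Nat) (hr : r < 2) : popcountB (r + 2 * x) = r + popcountB x := by
  rw [popcountB_eq]
  have h1 : (r + 2 * x) % 2 = r := by omega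
  have h2 : (r + 2 * x) / 2 = x := by omega
  rw [h1, h2]

theorem getMagicNumberLoop_eq (m : Nat) : ∀ (ans base curBase : Int),
    getMagicNumberLoop m ans base curBase = ans + base * (popcountB m : Int) := by
  induction m using Nat.strong_induction_on with
  | _ m ih =>
    intro ans base curBase
    rw [getMagicNumberLoop, popcountB]
    by_cases h : m = 0
    · simp [h]
    · rw [if_pos (by omega), if_neg h,
        ih (m / 2) (Nat.div_lt_self (by omega) (by omega))]
      push_cast
      ring

-- structural restatement of the table-building fold
def natTable : Nat → List Nat
  | 0 => List.replicate 256 0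
  | k + 1 => (natTable k).set (k + 1) ((natTable k).getD ((k + 1) / 2) 0 + (k + 1) % 2)

theorem popTable_fold (k : Nat) :
    ((List.range k).map (fun (j : Nat) => (1 : Int) + (j : Int))).foldl
      (fun t i => t.set i.toNat (t.getD (i.toNat >>> 1) 0 + (i.toNat &&& 1)))
      (List.replicate 256 0) = natTable k := by
  induction k with
  | zero => rfl
  | succ k ih =>
    rw [List.range_succ, List.map_append, List.foldl_append, ih]
    have h : ((1 : Int) + k).toNat = k + 1 := by omega
    simp only [List.map_cons, List.map_nil, List.foldl_cons, List.foldl_nil, h,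
      Nat.shiftRight_eq_div_pow, Nat.and_one_is_mod, natTable, pow_one]

theorem popTable_eq : popTable = natTable 255 := by
  have h255 : ((256 : Int) - 1).toNat = 255 := rfl
  rw [popTable, PySem.List.pyRange_one, h255, ← popTable_fold]

theorem natTable_length (k : Nat) : (natTable k).length = 256 := by
  induction k with
  | zero => exact List.length_replicate
  | succ k ih => show ((natTable k).set _ _).length = 256; rw [List.length_set, ih]

theorem natTable_getD (k : Nat) : ∀ j < 256,
    (natTable k).getD j 0 = if j ≤ k then popcountB j else 0 := by
  induction k with
  | zero =>
    intro j hj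
    have h0 : popcountB 0 = 0 := by rw [popcountB]; simp
    have hrep : (List.replicate 256 (0 : Nat)).getD j 0 = 0 := by
      rw [List.getD_eq_getElem?_getD, List.getElem?_replicate]
      split <;> rfl
    show (List.replicate 256 (0 : Nat)).getD j 0 = _
    rw [hrep]
    by_cases h : j = 0
    · subst h; rw [if_pos (Nat.le_refl 0), h0]
    · rw [if_neg (by omega)]
  | succ k ih =>
    intro j hj
    rw [natTable, List.getD_eq_getElem?_getD, List.getElem?_set]
    by_cases h : j = k + 1
    · subst h
      have hlen : k + 1 < (natTable k).length := by rw [natTable_length]; omega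
      have hd : (natTable k).getD ((k + 1) / 2) 0 = popcountB ((k + 1) / 2) := by
        rw [ih ((k + 1) / 2) (by omega), if_pos (by omega)]
      rw [if_pos rfl, if_pos hlen, if_pos (Nat.le_refl (k + 1))]
      simp only [Option.getD_some]
      rw [hd, popcountB_eq (k + 1)]
      omega
    · rw [if_neg (fun he => h he.symm), ← List.getD_eq_getElem?_getD, ih j hj]
      by_cases hk : j ≤ k
      · rw [if_pos hk, if_pos (by omega)]
      · rw [if_neg hk, if_neg (by omega)]

theorem popTable_getD (j : Nat) (hj : j < 256) : popTable.getD j 0 = popcountB j := by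
  rw [popTable_eq, natTable_getD 255 j hj, if_pos (by omega)]

theorem popcountB_split (m : Nat) :
    popcountB m = popcountB (m % 256) + popcountB (m / 256) := by
  suffices h : ∀ k m, popcountB m = popcountB (m % 2 ^ k) + popcountB (m / 2 ^ k) by
    exact h 8 m
  intro k
  induction k with
  | zero =>
    intro m
    have h0 : popcountB 0 = 0 := by rw [popcountB]; simp
    rw [pow_zero, Nat.mod_one, Nat.div_one, h0]
    omega
  | succ k ih =>
    intro m
    have h1 : m % 2 ^ (k + 1) = m % 2 + 2 * (m / 2 % 2 ^ k) := by
      rw [pow_succ, mul_comm (2 ^ k) 2, Nat.mod_mul]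
    have h2 : m / 2 ^ (k + 1) = m / 2 / 2 ^ k := by
      rw [pow_succ, mul_comm (2 ^ k) 2, Nat.div_div_eq_div_mul]
    rw [h1, h2, popcountB_bit _ _ (by omega), popcountB_eq m, ih (m / 2)]
    omega

theorem byteLoop_eq (m : Nat) : ∀ (ans base : Int),
    byteLoop m ans base = ans + base * (popcountB m : Int) := by
  induction m using Nat.strong_induction_on with
  | _ m ih =>
    intro ans base
    rw [byteLoop]
    by_cases h : m = 0
    · simp [h, popcountB]
    · rw [if_pos (by omega)]
      have hlt : m >>> 8 < m := by
        rw [Nat.shiftRight_eq_div_pow]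
        exact Nat.div_lt_self (by omega) (by norm_num)
      rw [ih (m >>> 8) hlt,
        Nat.and_two_pow_sub_one_eq_mod m 8,
        popTable_getD (m % 256) (by omega),
        Nat.shiftRight_eq_div_pow]
      rw [popcountB_split m]
      push_cast
      ring

-- ===== VERDICT (by name: the statement is the Claim_ definition above) =====
theorem getMagicNumber_spec : Claim_equal_getMagicNumber := by
  intro n base _
  unfold Spec_getMagicNumber getMagicNumber getMagicNumber_alt
  by_cases h : n > 0
  · rw [if_pos h, if_pos h, getMagicNumberLoop_eq, byteLoop_eq]
  · rw [if_neg h, if_neg h]
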